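-- pv_equiv track=rewrite | github.com/tiqwab/atcoder | abc252/c/main.py | check
-- ===== SOURCE A (Python) =====
-- from typing import List
--
-- def check(c: str, ss: List[int]) -> int:
--     poss = [0] * 10
--     for s in ss:
--         poss[s.index(c)] = poss[s.index(c)] + 1
--
--     ans = 0
--     for pos, count in enumerate(poss):
--         ans = max(ans, pos + 10 * (count - 1))
--
--     return ans
-- ===== SOURCE B (Python) =====
-- def check(c, ss):
--     idxs = sorted(s.index(c) for s in ss)
--     ans = 0
--     i = 0
--     n = len(idxs)
--     while i < n:
--         j = i + 1
--         while j < n and idxs[j] == idxs[i]: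
--             j += 1
--         ans = max(ans, idxs[i] + 10 * (j - i - 1))
--         i = j
--     return ans
-- ===== Notes on version B (the rewrite author's own statement) =====
-- stated objective: alternative
-- what changed: B replaces A's fixed 10-slot counter table plus enumerate-scan with a sort of the occurrence positions followed by a single run-length scan (two-pointer grouping) taking the max of pos + 10*(run-1) with default 0.
-- crash fix: When every s contains c but some s.index(c) is >= 10, A raises IndexError on the 10-slot table while B returns the intended maximum. — e.g. on check("z", ["0123456789z"]): A raises IndexError, B returns 10
import Mathlib
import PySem

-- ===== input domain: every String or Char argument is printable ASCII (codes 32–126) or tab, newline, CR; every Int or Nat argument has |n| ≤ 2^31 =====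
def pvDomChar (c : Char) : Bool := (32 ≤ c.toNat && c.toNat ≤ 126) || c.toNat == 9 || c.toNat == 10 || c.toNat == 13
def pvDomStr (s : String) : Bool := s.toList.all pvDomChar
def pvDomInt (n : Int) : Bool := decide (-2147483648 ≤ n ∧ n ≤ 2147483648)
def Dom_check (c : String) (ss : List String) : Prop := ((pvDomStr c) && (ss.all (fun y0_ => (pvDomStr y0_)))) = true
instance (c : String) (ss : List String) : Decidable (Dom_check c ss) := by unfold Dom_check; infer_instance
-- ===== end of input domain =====

-- B replaces A's fixed 10-slot counter table and enumerate-scan by sorting the occurrence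
-- positions and one run-length scan over the sorted list (max of pos + 10*(run-1), default 0).
-- Objective: alternative (sort-then-group instead of a count table; not faster).

-- ===== PORT A =====
def check (c : String) (ss : List String) : Int :=
  let poss : List Int := List.replicate 10 0
  let poss := ss.foldl (fun poss s =>
      PySem.List.pySetD poss (PySem.Str.find s c)
        (PySem.List.pyGetD poss (PySem.Str.find s c) 0 + 1)) poss
  (PySem.List.enumerate poss).foldl (fun ans pc => max ans (pc.1 + 10 * (pc.2 - 1))) 0

-- ===== PORT B =====
-- the two while loops of Source B: the inner while advances past the run of elements equal to
-- idxs[i] (takeWhile/dropWhile on the suffix), the outer while is the recursion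
def runScan (ans : Int) (l : List Int) : Int :=
  match l with
  | [] => ans
  | v :: rest =>
      runScan (max ans (v + 10 * ((rest.takeWhile (fun x => x == v)).length : Int)))
        (rest.dropWhile (fun x => x == v))
termination_by l.length
decreasing_by
  simp only [List.length_cons]
  exact Nat.lt_succ_of_le (List.length_dropWhile_le _ _)

def check_alt (c : String) (ss : List String) : Int :=
  let idxs := PySem.List.sorted (ss.map (fun s => PySem.Str.find s c)) (fun x => x) false
  runScan 0 idxs

-- ===== PRECONDITION & SPEC =====
-- Pre_ excludes inputs on which Python A raises: ValueError when some s does not contain c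
-- (s.index), IndexError when some s.index(c) ≥ 10 (the 10-slot table).
def Pre_check (c : String) (ss : List String) : Prop :=
  ∀ s ∈ ss, 0 ≤ PySem.Str.find s c ∧ PySem.Str.find s c < 10

instance (c : String) (ss : List String) : Decidable (Pre_check c ss) := by
  unfold Pre_check; infer_instance

def pvWitness_check : String × List String := ("b", ["ab", "ba", "abb"])

-- When every s contains c but some s.index(c) is >= 10, A raises IndexError on the 10-slot
-- table while B returns the intended maximum.
def Raises_check (c : String) (ss : List String) : Prop :=
  (∀ s ∈ ss, 0 ≤ PySem.Str.find s c) ∧ (∃ s ∈ ss, 10 ≤ PySem.Str.find s c)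

instance (c : String) (ss : List String) : Decidable (Raises_check c ss) := by
  unfold Raises_check; infer_instance

def pvRaiseWitness_check : String × List String := ("z", ["0123456789z"])
def pvRaiseWitnessOut_check : Int := 10

def Spec_check (c : String) (ss : List String) (out : Int) : Prop := out = check_alt c ss
instance (c : String) (ss : List String) (out : Int) : Decidable (Spec_check c ss out) := by unfold Spec_check; infer_instance

-- ===== CLAIM (what is proved, stated in full; the proofs are below) =====
def Claim_equal_check : Prop := ∀ (c : String) (ss : List String), Dom_check c ss → Pre_check c ss → Spec_check c ss (check c ss)

def Claim_raises_check : Prop := (∀ (c : String) (ss : List String), Dom_check c ss → Raises_check c ss → ¬ Pre_check c ss) ∧ (Dom_check (pvRaiseWitness_check.1) (pvRaiseWitness_check.2) ∧ Raises_check (pvRaiseWitness_check.1) (pvRaiseWitness_check.2) ∧ check_alt (pvRaiseWitness_check.1) (pvRaiseWitness_check.2) = pvRaiseWitnessOut_check)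

-- ===== LEMMAS AND PROOFS =====

-- upper bound for a left fold of max over Int lists
theorem foldl_max_le (l : List Int) (a c : Int) (ha : a ≤ c) (h : ∀ x ∈ l, x ≤ c) :
    l.foldl max a ≤ c := by
  induction l generalizing a with
  | nil => simpa using ha
  | cons y ys ih =>
    exact ih _ (max_le ha (h y (List.mem_cons_self))) (fun x hx => h x (List.mem_cons_of_mem _ hx))

-- a left fold of max is invariant under permutation of the list
theorem foldl_max_perm (l1 l2 : List Int) (h : l1.Perm l2) (a : Int) :
    l1.foldl max a = l2.foldl max a := by
  apply le_antisymm
  · exact foldl_max_le _ _ _ (PySem.List.le_foldl_max _ _).1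
      (fun x hx => (PySem.List.le_foldl_max _ _).2 _ (h.mem_iff.1 hx))
  · exact foldl_max_le _ _ _ (PySem.List.le_foldl_max _ _).1
      (fun x hx => (PySem.List.le_foldl_max _ _).2 _ (h.mem_iff.2 hx))

theorem foldl_max_replicate (k : Nat) (x a : Int) (hk : 0 < k) :
    (List.replicate k x).foldl max a = max a x := by
  induction k generalizing a with
  | zero => omega
  | succ m ih =>
    cases m with
    | zero => simp
    | succ m' => rw [List.replicate_succ, List.foldl_cons, ih _ (by omega), max_assoc, max_self]

def set_map_range (n j : Nat) (b : Nat → Int) (x : Int) :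
    ((List.range n).map b).set j x =
      (List.range n).map (fun p => if p = j then x else b p) := by
  apply List.ext_getElem
  · simp
  · intro k h1 h2
    simp only [List.getElem_set, List.getElem_map, List.getElem_range]
    by_cases hk : j = k
    · subst hk; simp
    · rw [if_neg hk, if_neg (fun h' => hk (Eq.symm h'))]

-- the table built by A's first loop counts the occurrence positions
theorem table_spec (c : String) (ss : List String) (b : Nat → Int)
    (h : ∀ s ∈ ss, 0 ≤ PySem.Str.find s c ∧ PySem.Str.find s c < 10) :
    ss.foldl (fun poss s =>
      PySem.List.pySetD poss (PySem.Str.find s c)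
        (PySem.List.pyGetD poss (PySem.Str.find s c) 0 + 1)) ((List.range 10).map b)
      = (List.range 10).map
          (fun p => b p + (((ss.map (fun s => PySem.Str.find s c)).count (p : Int) : Int))) := by
  induction ss generalizing b with
  | nil => simp
  | cons s rest ih =>
    have hs := h s (List.mem_cons_self)
    have hrest : ∀ t ∈ rest, 0 ≤ PySem.Str.find t c ∧ PySem.Str.find t c < 10 :=
      fun t ht => h t (List.mem_cons_of_mem _ ht)
    rw [List.foldl_cons]
    set i : Int := PySem.Str.find s c with hi
    have hcast : ((i.toNat : Int)) = i := Int.toNat_of_nonneg hs.1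
    have hget : PySem.List.pyGetD ((List.range 10).map b) i 0 = b i.toNat := by
      rw [PySem.List.pyGetD_eq_getElem _ 0 hs.1
        (by simp only [List.length_map, List.length_range]; exact_mod_cast hs.2)]
      simp
    have hset : PySem.List.pySetD ((List.range 10).map b) i (b i.toNat + 1)
        = (List.range 10).map
            (fun p => if p = i.toNat then b i.toNat + 1 else b p) := by
      rw [PySem.List.pySetD_of_nonneg _ _ hs.1, set_map_range]
    rw [hget, hset, ih _ hrest]
    apply List.ext_getElem
    · simp
    · intro k h1 h2
      simp only [List.getElem_map, List.getElem_range, List.map_cons, List.count_cons,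
        beq_iff_eq, Nat.cast_add, Nat.cast_ite, Nat.cast_one, Nat.cast_zero]
      rw [← hi]
      by_cases hk : k = i.toNat
      · subst hk
        rw [if_pos hcast.symm]
        simp
        omega
      · have hne : ¬ ((k : Int) = i) := by omega
        rw [if_neg hk, if_neg (fun h' => hne (Eq.symm h'))]
        ring

theorem enumerate_range' (j n : Nat) (b : Nat → Int) :
    PySem.List.enumerate ((List.range' j n).map b) (j : Int)
      = (List.range' j n).map (fun (p : Nat) => ((p : Int), b p)) := by
  induction n generalizing j with
  | zero => simp [PySem.List.enumerate_nil]
  | succ m ih =>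
    rw [List.range'_succ]
    simp only [List.map_cons, PySem.List.enumerate_cons]
    rw [show ((j : Int) + 1) = ((j + 1 : Nat) : Int) by push_cast; ring, ih]

-- A's second loop over enumerate(poss) as a fold of max over the values
theorem enum_fold (n : Nat) (cnt : Nat → Int) :
    (PySem.List.enumerate ((List.range n).map cnt)).foldl
        (fun ans pc => max ans (pc.1 + 10 * (pc.2 - 1))) 0
      = ((List.range n).map (fun (p : Nat) => ((p : Int) + 10 * (cnt p - 1)))).foldl max 0 := by
  rw [List.range_eq_range']
  have h := enumerate_range' 0 n cnt
  simp only [Nat.cast_zero] at h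
  rw [h, List.foldl_map, List.foldl_map]

-- A's value, under Pre_, is the max (from 0) of i + 10*(count(i)-1) over the occurrences
theorem a_val (c : String) (ss : List String)
    (hpre : ∀ s ∈ ss, 0 ≤ PySem.Str.find s c ∧ PySem.Str.find s c < 10) :
    check c ss
      = ((ss.map (fun s => PySem.Str.find s c)).map
          (fun i => i + 10 * ((((ss.map (fun s => PySem.Str.find s c)).count i : Nat) : Int) - 1))).foldl max 0 := by
  simp only [check]
  rw [show (List.replicate 10 (0 : Int)) = (List.range 10).map (fun _ => (0 : Int)) by decide]
  rw [table_spec c ss _ hpre]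
  simp only [zero_add]
  rw [enum_fold]
  have hmem : ∀ i ∈ ss.map (fun s => PySem.Str.find s c), 0 ≤ i ∧ i < 10 := by
    intro i hi
    rcases List.mem_map.1 hi with ⟨s, hs, rfl⟩
    exact hpre s hs
  apply le_antisymm
  · apply foldl_max_le _ _ _ (PySem.List.le_foldl_max _ _).1
    intro x hx
    rcases List.mem_map.1 hx with ⟨p, hp, rfl⟩
    have hp10 : p < 10 := List.mem_range.1 hp
    by_cases hin : ((p : Int)) ∈ ss.map (fun s => PySem.Str.find s c)
    · exact (PySem.List.le_foldl_max _ _).2 _ (List.mem_map.2 ⟨_, hin, rfl⟩)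
    · have hc0 : (ss.map (fun s => PySem.Str.find s c)).count ((p : Int)) = 0 :=
        List.count_eq_zero.2 hin
      have hle : ((p : Int)) + 10 * ((((ss.map (fun s => PySem.Str.find s c)).count ((p : Int)) : Nat) : Int) - 1) ≤ 0 := by
        rw [hc0]; push_cast; omega
      exact le_trans hle ((PySem.List.le_foldl_max _ _).1)
  · apply foldl_max_le _ _ _ (PySem.List.le_foldl_max _ _).1
    intro x hx
    rcases List.mem_map.1 hx with ⟨i, hi, rfl⟩
    have h01 := hmem i hi
    have hcast : ((i.toNat : Int)) = i := by omega
    apply (PySem.List.le_foldl_max _ _).2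
    apply List.mem_map.2
    refine ⟨i.toNat, List.mem_range.2 (by omega), ?_⟩
    rw [hcast]

-- the first element surviving dropWhile falsifies the predicate
theorem dropWhile_head_false (p : Int → Bool) (l : List Int) (h : Int) (d' : List Int)
    (he : l.dropWhile p = h :: d') : p h = false := by
  induction l with
  | nil => simp at he
  | cons x xs ih =>
    by_cases hp : p x
    · rw [List.dropWhile_cons_of_pos hp] at he
      exact ih he
    · rw [List.dropWhile_cons_of_neg hp] at he
      cases he
      simpa using hp

theorem runScan_nil (a : Int) : runScan a [] = a := by rw [runScan]

theorem runScan_cons (a v : Int) (rest : List Int) :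
    runScan a (v :: rest)
      = runScan (max a (v + 10 * ((rest.takeWhile (fun x => x == v)).length : Int)))
          (rest.dropWhile (fun x => x == v)) := by rw [runScan]

-- the run-length scan over a sorted list computes the max of i + 10*(count(i)-1)
theorem runScan_spec (l : List Int) (hl : l.Pairwise (· ≤ ·)) (a : Int) :
    runScan a l
      = (l.map (fun v => v + 10 * (((l.count v : Nat) : Int) - 1))).foldl max a := by
  induction hn : l.length using Nat.strong_induction_on generalizing l a with
  | _ n ih =>
  cases l with
  | nil => rw [runScan_nil]; simp
  | cons v rest =>
    subst hn
    set t := rest.takeWhile (fun x => x == v) with ht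
    set d := rest.dropWhile (fun x => x == v) with hd
    have hrest : t ++ d = rest := List.takeWhile_append_dropWhile
    have htv : ∀ x ∈ t, x = v := by
      intro x hx
      have := List.mem_takeWhile_imp hx
      simpa using this
    have hvrest : ∀ x ∈ rest, v ≤ x := fun x hx => List.rel_of_pairwise_cons hl hx
    have hd_pw : d.Pairwise (· ≤ ·) :=
      List.Pairwise.sublist (List.dropWhile_sublist _) (List.Pairwise.of_cons hl)
    have hdne : ∀ x ∈ d, x ≠ v := by
      intro x hx hxv
      cases hdd : d with
      | nil => rw [hdd] at hx; simp at hx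
      | cons h d' =>
        have hne : ¬ (h = v) := by
          have hf := dropWhile_head_false (fun x => x == v) rest h d' (by rw [← hd, hdd])
          simpa using hf
        have hvh : v ≤ h := hvrest h (by rw [← hrest, hdd]; simp)
        have hhx : h ≤ x := by
          rw [hdd] at hd_pw hx
          rcases List.mem_cons.1 hx with rfl | hx'
          · exact le_refl _
          · exact List.rel_of_pairwise_cons hd_pw hx'
        omega
    have hcntv : (v :: rest).count v = t.length + 1 := by
      rw [← hrest, List.count_cons_self, List.count_append,
        List.count_eq_length.2 (fun b hb => (htv b hb).symm),
        List.count_eq_zero.2 (fun hmem => hdne v hmem rfl)]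
    have hcntd : ∀ w ∈ d, (v :: rest).count w = d.count w := by
      intro w hw
      rw [← hrest, List.count_cons_of_ne (fun h => hdne w hw h.symm), List.count_append,
        List.count_eq_zero.2 (fun hmem => (hdne w hw) ((htv w hmem))), Nat.zero_add]
    -- decompose the mapped list
    have hmap : (v :: rest).map (fun x => x + 10 * ((((v :: rest).count x : Nat) : Int) - 1))
        = List.replicate (t.length + 1) (v + 10 * (t.length : Int))
            ++ d.map (fun x => x + 10 * (((d.count x : Nat) : Int) - 1)) := by
      rw [← hrest]
      rw [show (v :: (t ++ d)) = (v :: t) ++ d from rfl, List.map_append]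
      congr 1
      · apply List.eq_replicate_iff.2
        constructor
        · simp
        · intro b hb
          rcases List.mem_map.1 hb with ⟨x, hx, rfl⟩
          have hxv : x = v := by
            rcases List.mem_cons.1 hx with rfl | hx'
            · rfl
            · exact htv x hx'
          rw [hxv, show (v :: t) ++ d = v :: (t ++ d) from rfl, hrest, hcntv]
          push_cast
          ring
      · apply List.map_congr_left
        intro w hw
        rw [show (v :: t) ++ d = v :: (t ++ d) from rfl, hrest, hcntd w hw]
    rw [runScan_cons, ← ht, ← hd, hmap, List.foldl_append,
      foldl_max_replicate _ _ _ (Nat.succ_pos _)]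
    have hdl : d.length ≤ rest.length := by
      rw [hd]; exact List.length_dropWhile_le _ _
    exact ih d.length (by simp only [List.length_cons]; omega) d hd_pw _ rfl

-- ===== VERDICT (by name: the statement is the Claim_ definition above) =====
theorem check_spec : Claim_equal_check := by
  intro c ss _ hpre
  unfold Spec_check
  set idxs := ss.map (fun s => PySem.Str.find s c) with hidxs
  set sl := PySem.List.sorted idxs (fun x => x) false with hsl
  have hperm : sl.Perm idxs := PySem.List.sorted_perm _ _ _
  have hpw : sl.Pairwise (· ≤ ·) := by
    have := PySem.List.sorted_pairwise (xs := idxs) (key := fun x => x)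
    simpa using this
  rw [a_val c ss hpre, check_alt]
  simp only [← hidxs, ← hsl]
  rw [runScan_spec sl hpw 0]
  have hcnt : ∀ v : Int, sl.count v = idxs.count v := fun v => hperm.count_eq v
  have hmapeq : sl.map (fun v => v + 10 * (((sl.count v : Nat) : Int) - 1))
      = sl.map (fun v => v + 10 * (((idxs.count v : Nat) : Int) - 1)) := by
    apply List.map_congr_left
    intro v _
    rw [hcnt v]
  rw [hmapeq]
  exact (foldl_max_perm _ _ (hperm.map _) 0).symm

@[simp] theorem check_raises : Claim_raises_check := by
  unfold Claim_raises_check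
  constructor
  · intro c ss _ hr hpre
    rcases hr.2 with ⟨s, hs, h10⟩
    have := (hpre s hs).2
    omega
  · refine ⟨by decide, by decide, ?_⟩
    show check_alt "z" ["0123456789z"] = 10
    rw [show check_alt "z" ["0123456789z"]
        = runScan 0 (PySem.List.sorted ([("0123456789z" : String)].map
            (fun s => PySem.Str.find s "z")) (fun x => x) false) from rfl]
    rw [show PySem.List.sorted ([("0123456789z" : String)].map
            (fun s => PySem.Str.find s "z")) (fun x => x) false = [(10 : Int)] from by decide]
    simp [runScan_cons, runScan_nil]
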